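-- pv_equiv track=rewrite | github.com/MrBrantCode/unitest_baseline | mut_generate/mist_train_taco/taco_10915/solution.py | get_pandigital_sequence
-- ===== SOURCE A (Python) =====
-- def get_pandigital_sequence(offset, size):
--     # Initialize the starting point for pandigital numbers
--     start = 1023456789
--     # Initialize the list to store pandigital numbers
--     pandigital_numbers = []
--
--     # Determine the actual starting point based on the offset
--     if offset > 0 and offset > start:
--         current = offset
--     else:
--         current = start
--
--     # Loop through potential pandigital numbers
--     while current <= 9876543210 and len(pandigital_numbers) < size:
--         current_str = str(current)
--         # Check if the number is pandigital
--         if current_str[0] != '0' and len(set(current_str)) == 10: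
--             pandigital_numbers.append(current)
--         current += 1
--
--     return pandigital_numbers
-- ===== SOURCE B (Python) =====
-- def get_pandigital_sequence(offset, size):
--     start = 1023456789
--     current = offset if offset > 0 and offset > start else start
--     # pandigital numbers have digit sum 45, hence are divisible by 9: scan multiples of 9 only
--     current += -current % 9
--     target = list(range(10))
--     result = []
--     while current <= 9876543210 and len(result) < size:
--         digits = []
--         n = current
--         while n:
--             digits.append(n % 10)
--             n //= 10
--         if sorted(digits) == target:
--             result.append(current)
--         current += 9
--     return result
-- ===== Notes on version B (the rewrite author's own statement) =====
-- stated objective: faster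
-- what changed: B uses the number-theoretic fact that a 10-digit pandigital number has digit sum 45 and is therefore divisible by 9: it jumps to the first multiple of 9 at or after the start and scans only multiples of 9, testing each candidate arithmetically (extract digits, compare sorted digit list with [0..9]) instead of A's scan of every integer with a string/set test.
import Mathlib
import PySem

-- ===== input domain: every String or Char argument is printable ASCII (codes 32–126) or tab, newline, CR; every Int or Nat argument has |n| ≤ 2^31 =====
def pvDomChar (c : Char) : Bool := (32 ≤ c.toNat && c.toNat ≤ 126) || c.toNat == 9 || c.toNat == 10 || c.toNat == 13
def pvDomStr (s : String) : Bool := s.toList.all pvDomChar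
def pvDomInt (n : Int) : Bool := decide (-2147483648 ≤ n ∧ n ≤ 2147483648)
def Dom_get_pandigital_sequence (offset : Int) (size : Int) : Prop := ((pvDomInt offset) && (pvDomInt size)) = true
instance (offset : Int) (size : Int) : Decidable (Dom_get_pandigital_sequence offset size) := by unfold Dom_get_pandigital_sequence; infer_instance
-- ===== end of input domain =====

-- B jumps to the first multiple of 9 and scans only multiples of 9 with an arithmetic
-- digit test (pandigital numbers have digit sum 45, hence are divisible by 9); measured
-- constant-factor faster than A's scan of every integer with a string/set test.


-- ===== PORT A =====
-- the pandigitality test of A: current_str[0] != '0' and len(set(current_str)) == 10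
def pvPandA (current : Int) : Bool :=
  let cs := PySem.Int.toChars current
  (PySem.List.pyGetD cs 0 '?' != '0') && (PySem.Set.len (PySem.Set.ofList cs) == 10)

-- A's while loop: scan every integer in [current, 9876543210]
def pvLoopA (size : Int) (acc : List Int) (current : Int) : List Int :=
  if h : current ≤ 9876543210 ∧ (acc.length : Int) < size then
    pvLoopA size (if pvPandA current then acc ++ [current] else acc) (current + 1)
  else acc
termination_by (9876543211 - current).toNat
decreasing_by omega

def get_pandigital_sequence (offset : Int) (size : Int) : List Int :=
  let start : Int := 1023456789
  let current : Int := if offset > 0 ∧ offset > start then offset else start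
  pvLoopA size [] current

-- ===== PORT B =====
-- the inner digit-extraction loop of B: while n > 0: digits.append(n % 10); n //= 10
def pvDigitsB (n : Int) (ds : List Int) : List Int :=
  if _h : 0 < n then
    pvDigitsB (PySem.Int.floordiv n 10) (ds ++ [PySem.Int.mod n 10])
  else ds
termination_by n.toNat
decreasing_by
  rw [PySem.Int.floordiv_eq_ediv_of_pos (by norm_num)]; omega

-- B's pandigitality test: sorted(digits) == list(range(10))
def pvCheckB (current : Int) : Bool :=
  let ds := pvDigitsB current []
  PySem.List.sorted ds (fun x => x) false == PySem.List.pyRange 0 10 1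

-- B's while loop: scan only multiples of 9
def pvLoopB (size : Int) (acc : List Int) (current : Int) : List Int :=
  if h : current ≤ 9876543210 ∧ (acc.length : Int) < size then
    pvLoopB size (if pvCheckB current then acc ++ [current] else acc) (current + 9)
  else acc
termination_by (9876543211 - current).toNat
decreasing_by omega

def get_pandigital_sequence_alt (offset : Int) (size : Int) : List Int :=
  let start : Int := 1023456789
  let current : Int := if offset > 0 ∧ offset > start then offset else start
  let current' : Int := current + PySem.Int.mod (-current) 9
  pvLoopB size [] current'

-- ===== PRECONDITION & SPEC =====
def Spec_get_pandigital_sequence (offset : Int) (size : Int) (out : List Int) : Prop := out = get_pandigital_sequence_alt offset size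
instance (offset : Int) (size : Int) (out : List Int) : Decidable (Spec_get_pandigital_sequence offset size out) := by unfold Spec_get_pandigital_sequence; infer_instance

-- ===== CLAIM (what is proved, stated in full; the proofs are below) =====
def Claim_equal_get_pandigital_sequence : Prop := ∀ (offset : Int) (size : Int), Dom_get_pandigital_sequence offset size → Spec_get_pandigital_sequence offset size (get_pandigital_sequence offset size)

-- ===== LEMMAS AND PROOFS =====

theorem pv_toDigitsCore_eq (f : Nat) : ∀ (n : Nat) (ds : List Char), 0 < n → n ≤ f →
    Nat.toDigitsCore 10 f n ds = ((Nat.digits 10 n).map Nat.digitChar).reverse ++ ds := by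
  induction f with
  | zero => intro n ds h1 h2; omega
  | succ f ih =>
    intro n ds h1 h2
    rw [Nat.toDigitsCore]
    by_cases h : n / 10 = 0
    · have hn10 : n < 10 := by omega
      rw [if_pos h]
      have : Nat.digits 10 n = [n] := Nat.digits_def' (by norm_num) h1 |>.trans (by
        rw [Nat.mod_eq_of_lt hn10, h]; simp)
      rw [this]; simp [Nat.mod_eq_of_lt hn10]
    · rw [if_neg h]
      rw [ih (n / 10) _ (by omega) (by omega)]
      rw [Nat.digits_def' (by norm_num : (1:Nat) < 10) h1]
      simp

theorem pv_toChars_eq (c : Int) (h : 0 < c) :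
    PySem.Int.toChars c = ((Nat.digits 10 c.toNat).map Nat.digitChar).reverse := by
  unfold PySem.Int.toChars
  rw [if_neg (by omega), Nat.toDigits, pv_toDigitsCore_eq (c.toNat + 1) c.toNat [] (by omega) (by omega)]
  simp

theorem pv_ofList_card (l : List Char) : PySem.Set.len (PySem.Set.ofList l) = (l.toFinset.card : Int) := by
  have h1 : (PySem.Set.ofList l).toFinset = l.toFinset := by
    ext x; simp [PySem.Set.mem_ofList]
  have h2 := List.toFinset_card_of_nodup (PySem.Set.nodup_ofList l)
  rw [← h1, h2]; rfl

theorem pv_digitChar_inj : ∀ a b : Nat, a < 10 → b < 10 → Nat.digitChar a = Nat.digitChar b → a = b := by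
  intro a b ha hb
  interval_cases a <;> interval_cases b <;> simp <;> decide

theorem pv_pandA_iff (c : Int) (h : 0 < c) :
    pvPandA c = true ↔ (Nat.digits 10 c.toNat).toFinset.card = 10 := by
  have hne : Nat.digits 10 c.toNat ≠ [] := Nat.digits_ne_nil_iff_ne_zero.mpr (by omega)
  set ds := Nat.digits 10 c.toNat with hds
  have hlt : ∀ d ∈ ds, d < 10 := fun d hd => Nat.digits_lt_base (by norm_num) hd
  have hlast := Nat.getLast_digit_ne_zero 10 (show c.toNat ≠ 0 by omega)
  -- head of the char list
  have hcs : PySem.Int.toChars c = (ds.map Nat.digitChar).reverse := pv_toChars_eq c h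
  have hhead : (PySem.Int.toChars c).head? = some (Nat.digitChar (ds.getLast hne)) := by
    rw [hcs, List.head?_reverse, List.getLast?_map, List.getLast?_eq_getLast_of_ne_nil hne]
    rfl
  have hcard : (PySem.Int.toChars c).toFinset.card = ds.toFinset.card := by
    rw [hcs, List.toFinset_reverse]
    have : (ds.map Nat.digitChar).toFinset = ds.toFinset.image Nat.digitChar := by
      ext x; simp
    rw [this]
    apply Finset.card_image_of_injOn
    intro a ha b hb hab
    exact pv_digitChar_inj a b (hlt a (by simpa using ha)) (hlt b (by simpa using hb)) hab
  have hdig : ∀ d, d < 10 → d ≠ 0 → Nat.digitChar d ≠ '0' := by decide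
  have hlast10 : ds.getLast hne < 10 := hlt _ (List.getLast_mem hne)
  obtain ⟨a, t, hct⟩ : ∃ a t, PySem.Int.toChars c = a :: t := by
    cases hc : PySem.Int.toChars c with
    | nil => rw [hc] at hhead; simp at hhead
    | cons a t => exact ⟨a, t, rfl⟩
  have ha : a = Nat.digitChar (ds.getLast hne) := by
    rw [hct] at hhead; simpa using hhead
  have hane : a ≠ '0' := ha ▸ hdig _ hlast10 hlast
  constructor
  · intro hp
    unfold pvPandA at hp
    simp only [Bool.and_eq_true, beq_iff_eq] at hp
    have h2 := hp.2
    rw [pv_ofList_card, hcard] at h2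
    exact_mod_cast h2
  · intro hcd
    unfold pvPandA
    simp only [Bool.and_eq_true, bne_iff_ne, ne_eq, beq_iff_eq]
    constructor
    · rw [hct]
      simpa [PySem.List.pyGetD, PySem.List.pyGet?, PySem.List.pyIdx?] using hane
    · rw [pv_ofList_card, hcard, hcd]; norm_num

theorem pv_digitsB_eq (n : Int) (acc : List Int) (h : 0 ≤ n) :
    pvDigitsB n acc = acc ++ (Nat.digits 10 n.toNat).map (fun d : Nat => (d : Int)) := by
  rw [pvDigitsB]
  by_cases hp : 0 < n
  · rw [dif_pos hp]
    have hmod : PySem.Int.mod n 10 = ((n.toNat % 10 : Nat) : Int) := by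
      rw [PySem.Int.mod_eq_emod_of_pos (by norm_num)]; omega
    have hdiv : PySem.Int.floordiv n 10 = ((n.toNat / 10 : Nat) : Int) := by
      rw [PySem.Int.floordiv_eq_ediv_of_pos (by norm_num)]; omega
    rw [hmod, hdiv, pv_digitsB_eq _ _ (by positivity)]
    rw [Nat.digits_def' (by norm_num : (1:Nat) < 10) (by omega : 0 < n.toNat)]
    have htn : ((((n.toNat / 10 : Nat)) : Int)).toNat = n.toNat / 10 := by omega
    rw [htn]
    simp
  · rw [dif_neg hp]
    have : n.toNat = 0 := by omega
    simp [this]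
termination_by n.toNat
decreasing_by
  omega

theorem pv_checkB_iff (c : Int) (h : 0 ≤ c) :
    pvCheckB c = true ↔ (Nat.digits 10 c.toNat).Perm (List.range 10) := by
  unfold pvCheckB
  rw [pv_digitsB_eq c [] h]
  simp only [List.nil_append, beq_iff_eq]
  have hrange : PySem.List.pyRange 0 10 1 = (List.range 10).map (fun d : Nat => (d : Int)) := by decide
  rw [hrange]
  constructor
  · intro hs
    have hperm := PySem.List.sorted_perm ((Nat.digits 10 c.toNat).map (fun d : Nat => (d : Int))) (fun x => x) false
    rw [hs] at hperm
    have hperm' : ((Nat.digits 10 c.toNat).map (fun d : Nat => (d : Int))).Perm ((List.range 10).map (fun d : Nat => (d : Int))) := hperm.symm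
    exact (List.map_perm_map_iff (fun a b hab => by exact_mod_cast hab)).mp hperm'
  · intro hp
    apply PySem.List.sorted_eq_of_perm_of_pairwise_lt
    · exact (List.Perm.map (fun d : Nat => (d : Int)) hp).symm
    · have : ((List.range 10).map (fun d : Nat => (d : Int))).Pairwise (· < ·) := by decide
      simpa using this

theorem pv_bridge (m : Nat) (hm : m < 10 ^ 10) :
    (Nat.digits 10 m).toFinset.card = 10 ↔ (Nat.digits 10 m).Perm (List.range 10) := by
  set ds := Nat.digits 10 m with hds
  have hlt : ∀ d ∈ ds, d < 10 := fun d hd => Nat.digits_lt_base (by norm_num) hd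
  have hlen : ds.length ≤ 10 := (Nat.digits_length_le_iff (by norm_num) m).mpr hm
  constructor
  · intro hcard
    have hdedup : ds.dedup.length = 10 := by rw [← List.card_toFinset]; exact hcard
    have hsub := List.dedup_sublist ds
    have hlen2 : ds.length = 10 := le_antisymm hlen (by
      have := hsub.length_le; omega)
    have heq : ds.dedup = ds := hsub.eq_of_length (by omega)
    have hnd : ds.Nodup := heq ▸ List.nodup_dedup ds
    have hsubs : ds.toFinset ⊆ Finset.range 10 := by
      intro x hx; simp only [List.mem_toFinset] at hx
      exact Finset.mem_range.mpr (hlt x hx)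
    have hfeq : ds.toFinset = Finset.range 10 :=
      Finset.eq_of_subset_of_card_le hsubs (by rw [hcard, Finset.card_range])
    exact List.perm_of_nodup_nodup_toFinset_eq hnd (List.nodup_range) (by
      rw [hfeq, List.toFinset_range])
  · intro hp
    rw [List.toFinset_eq_of_perm _ _ hp, List.toFinset_range, Finset.card_range]

theorem pv_div9 (m : Nat) (h : (Nat.digits 10 m).Perm (List.range 10)) : 9 ∣ m := by
  have hsum : (Nat.digits 10 m).sum = 45 := by
    rw [h.sum_eq]; decide
  have hmod := Nat.modEq_digits_sum 9 10 (by norm_num) m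
  rw [hsum] at hmod
  simp [Nat.ModEq] at hmod
  omega

theorem pv_check_eq (c : Int) (h1 : 1 ≤ c) (h2 : c ≤ 9876543210) :
    pvPandA c = pvCheckB c := by
  have hpow : c.toNat < 10 ^ 10 := by
    have h10 : (10:ℕ) ^ 10 = 10000000000 := by norm_num
    omega
  rw [Bool.eq_iff_iff, pv_pandA_iff c (by omega), pv_checkB_iff c (by omega)]
  exact pv_bridge c.toNat hpow

theorem pv_loopAB (size : Int) (acc : List Int) (current : Int) (h1 : 1 ≤ current) :
    pvLoopA size acc current = pvLoopB size acc (current + PySem.Int.mod (-current) 9) := by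
  have hr : PySem.Int.mod (-current) 9 = (-current) % 9 := PySem.Int.mod_eq_emod_of_pos (by norm_num)
  rw [pvLoopA, hr]
  by_cases hc : current ≤ 9876543210 ∧ (acc.length : Int) < size
  · rw [dif_pos hc]
    by_cases h9 : (9:Int) ∣ current
    · have hr_eq : (-current) % 9 = 0 := by omega
      rw [hr_eq, add_zero, pvLoopB, dif_pos hc, pv_check_eq current h1 hc.1]
      rw [pv_loopAB size (if pvCheckB current then acc ++ [current] else acc) (current + 1) (by omega)]
      rw [PySem.Int.mod_eq_emod_of_pos (by norm_num)]
      have he : current + 1 + (-(current + 1)) % 9 = current + 9 := by omega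
      rw [he]
    · have hpow : current.toNat < 10 ^ 10 := by
        have h10 : (10:ℕ) ^ 10 = 10000000000 := by norm_num
        omega
      have hAfalse : pvPandA current = false := by
        rcases Bool.eq_false_or_eq_true (pvPandA current) with hA | hA
        swap
        · exact hA
        · exfalso
          have hcard := (pv_pandA_iff current (by omega)).mp hA
          have hperm := (pv_bridge current.toNat hpow).mp hcard
          have hdv := pv_div9 current.toNat hperm
          have hdvi : (9:Int) ∣ current := by
            have hcast := Int.natCast_dvd_natCast.mpr hdv
            simpa [Int.toNat_of_nonneg (by omega : (0:Int) ≤ current)] using hcast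
          exact h9 hdvi
      rw [hAfalse]
      simp only [Bool.false_eq_true, if_false]
      rw [pv_loopAB size acc (current + 1) (by omega)]
      rw [PySem.Int.mod_eq_emod_of_pos (by norm_num)]
      have he : current + 1 + (-(current + 1)) % 9 = current + (-current) % 9 := by omega
      rw [he]
  · rw [dif_neg hc, pvLoopB, dif_neg (by omega)]
termination_by (9876543211 - current).toNat
decreasing_by all_goals omega

-- ===== VERDICT (by name: the statement is the Claim_ definition above) =====
theorem get_pandigital_sequence_spec : Claim_equal_get_pandigital_sequence := by
  intro offset size _
  unfold Spec_get_pandigital_sequence get_pandigital_sequence get_pandigital_sequence_alt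
  apply pv_loopAB
  split <;> omega
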